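-- pv_equiv track=rewrite | github.com/jramaswami/Binary_Search_Python | mutual_followers.py | solve
-- ===== SOURCE A (Python) =====
-- from collections import defaultdict
--
-- def solve(relations):
--     following = defaultdict(set)
--     soln = set()
--     for a, b in relations:
--         following[a].add(b)
--         if a in following[b]:
--             soln.add(a)
--             soln.add(b)
--     return list(sorted(soln))
-- ===== SOURCE B (Python) =====
-- from collections import Counter
--
-- def solve(relations):
--     # Group-and-count decomposition: dedupe directed edges, count distinct
--     # directed edges per unordered pair; a pair is mutual iff it carries two
--     # distinct directed edges, or is a self-loop.
--     distinct = set(relations)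
--     cnt = Counter((min(a, b), max(a, b)) for a, b in distinct)
--     out = set()
--     for (x, y), c in cnt.items():
--         if c == 2 or x == y:
--             out.add(x)
--             out.add(y)
--     return sorted(out)
-- ===== Notes on version B (the rewrite author's own statement) =====
-- stated objective: alternative
-- what changed: Replaces A's interleaved pass (growing a per-user adjacency dict while testing reversed membership) with a group-and-count algorithm: dedupe the directed edges, count distinct directed edges per unordered pair with a Counter, and emit a pair's users when its count is 2 or it is a self-loop; no reversed-edge membership test occurs.
import Mathlib
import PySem

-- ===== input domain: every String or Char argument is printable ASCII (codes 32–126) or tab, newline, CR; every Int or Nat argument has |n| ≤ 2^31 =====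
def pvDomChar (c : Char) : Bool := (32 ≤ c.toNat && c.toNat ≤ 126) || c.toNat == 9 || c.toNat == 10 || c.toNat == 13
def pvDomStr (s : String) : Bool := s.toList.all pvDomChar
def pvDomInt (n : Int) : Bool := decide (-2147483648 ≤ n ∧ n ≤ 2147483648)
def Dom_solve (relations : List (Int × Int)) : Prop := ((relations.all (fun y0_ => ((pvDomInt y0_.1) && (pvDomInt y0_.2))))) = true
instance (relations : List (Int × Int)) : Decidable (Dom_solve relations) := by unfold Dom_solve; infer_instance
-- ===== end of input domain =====

-- B differs from A by algorithm: A grows an adjacency dict while testing reversed membership;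
-- B dedupes the edges, counts distinct directed edges per unordered pair, and keeps the pairs
-- whose count is 2 (or that are self-loops) — no reversed-edge membership test at all.

-- ===== PORT A =====
-- one loop step: following[a].add(b); if a in following[b]: soln.add(a); soln.add(b)
def solveStepA (st : PySem.Dict Int (PySem.Set Int) × PySem.Set Int) (r : Int × Int) :
    PySem.Dict Int (PySem.Set Int) × PySem.Set Int :=
  let following := st.1.insert r.1 (PySem.Set.add (st.1.getD r.1 PySem.Set.empty) r.2)
  let soln := if PySem.Set.contains (following.getD r.2 PySem.Set.empty) r.1 then
                PySem.Set.add (PySem.Set.add st.2 r.1) r.2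
              else st.2
  (following, soln)

def solve (relations : List (Int × Int)) : List Int :=
  PySem.List.sorted (relations.foldl solveStepA (PySem.Dict.empty, PySem.Set.empty)).2
    (fun x => x) false

-- ===== PORT B =====
-- key of an edge = its unordered pair: (min(a, b), max(a, b))
def keyOf (e : Int × Int) : Int × Int := (min e.1 e.2, max e.1 e.2)

-- one loop step over cnt.items: if c == 2 or x == y: out.add(x); out.add(y)
def solveStepB (s : PySem.Set Int) (kv : (Int × Int) × Int) : PySem.Set Int :=
  if kv.2 == 2 || kv.1.1 == kv.1.2 then PySem.Set.add (PySem.Set.add s kv.1.1) kv.1.2 else s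

def solve_alt (relations : List (Int × Int)) : List Int :=
  let distinct := PySem.Set.ofList relations
  let cnt := PySem.Dict.counter (distinct.map keyOf)
  let out := cnt.items.foldl solveStepB PySem.Set.empty
  PySem.List.sorted out (fun x => x) false

-- ===== PRECONDITION & SPEC =====
def Spec_solve (relations : List (Int × Int)) (out : List Int) : Prop := out = solve_alt relations
instance (relations : List (Int × Int)) (out : List Int) : Decidable (Spec_solve relations out) := by unfold Spec_solve; infer_instance

-- ===== CLAIM (what is proved, stated in full; the proofs are below) =====
def Claim_equal_solve : Prop := ∀ (relations : List (Int × Int)), Dom_solve relations → Spec_solve relations (solve relations)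

-- ===== LEMMAS AND PROOFS =====

-- the mutual-pair predicate: x belongs to the answer for processed prefix p
def Mut (p : List (Int × Int)) (x : Int) : Prop :=
  ∃ a b : Int, (a, b) ∈ p ∧ (b, a) ∈ p ∧ (x = a ∨ x = b)

lemma mut_append_singleton (p : List (Int × Int)) (a b x : Int) :
    Mut (p ++ [(a, b)]) x ↔ Mut p x ∨ (((b, a) ∈ p ∨ b = a) ∧ (x = a ∨ x = b)) := by
  simp only [Mut, List.mem_append, List.mem_singleton, Prod.mk.injEq]
  constructor
  · rintro ⟨u, v, hu | ⟨hu1, hu2⟩, hv | ⟨hv1, hv2⟩, hx⟩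
    · exact Or.inl ⟨u, v, hu, hv, hx⟩
    · subst_vars; exact Or.inr ⟨Or.inl hu, hx.symm⟩
    · subst_vars; exact Or.inr ⟨Or.inl hv, hx⟩
    · subst_vars; exact Or.inr ⟨Or.inr rfl, by tauto⟩
  · rintro (⟨u, v, hu, hv, hx⟩ | ⟨hba | hba, hx⟩)
    · exact ⟨u, v, Or.inl hu, Or.inl hv, hx⟩
    · exact ⟨a, b, Or.inr ⟨rfl, rfl⟩, Or.inl hba, hx⟩
    · subst hba
      exact ⟨b, b, Or.inr ⟨rfl, rfl⟩, Or.inr ⟨rfl, rfl⟩, by tauto⟩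

-- A's loop invariant: following models membership of the processed prefix, soln models Mut
lemma solveA_inv (l : List (Int × Int)) : ∀ (p : List (Int × Int))
    (d : PySem.Dict Int (PySem.Set Int)) (s : PySem.Set Int),
    (∀ k x : Int, x ∈ d.getD k PySem.Set.empty ↔ (k, x) ∈ p) →
    (∀ x : Int, x ∈ s ↔ Mut p x) → s.Nodup →
    (∀ x : Int, x ∈ (l.foldl solveStepA (d, s)).2 ↔ Mut (p ++ l) x) ∧
      (l.foldl solveStepA (d, s)).2.Nodup := by
  induction l with
  | nil => intro p d s hd hs hnd; simpa using ⟨hs, hnd⟩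
  | cons r t ih =>
    intro p d s hd hs hnd
    obtain ⟨a, b⟩ := r
    have hfoll : ∀ k x : Int,
        x ∈ (d.insert a (PySem.Set.add (d.getD a PySem.Set.empty) b)).getD k PySem.Set.empty
          ↔ (k, x) ∈ p ++ [(a, b)] := by
      intro k x
      rw [PySem.Dict.getD_insert]
      split <;> rename_i hk
      · subst hk
        simp only [PySem.Set.mem_add, hd, List.mem_append, List.mem_singleton, Prod.mk.injEq]
        tauto
      · simp only [hd, List.mem_append, List.mem_singleton, Prod.mk.injEq]
        tauto
    have hcond :
        PySem.Set.contains
          ((d.insert a (PySem.Set.add (d.getD a PySem.Set.empty) b)).getD b PySem.Set.empty) a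
            = true ↔ ((b, a) ∈ p ∨ b = a) := by
      rw [PySem.Set.contains_iff, hfoll]
      simp only [List.mem_append, List.mem_singleton, Prod.mk.injEq]
      tauto
    have hsNew : ∀ x : Int,
        x ∈ (if PySem.Set.contains
              ((d.insert a (PySem.Set.add (d.getD a PySem.Set.empty) b)).getD b PySem.Set.empty) a
            then PySem.Set.add (PySem.Set.add s a) b else s) ↔ Mut (p ++ [(a, b)]) x := by
      intro x
      by_cases hc : ((b, a) ∈ p ∨ b = a)
      · rw [if_pos (hcond.mpr hc)]
        simp only [PySem.Set.mem_add, hs, mut_append_singleton]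
        tauto
      · rw [if_neg (fun h => hc (hcond.mp h))]
        rw [hs, mut_append_singleton]
        tauto
    have hndNew : (if PySem.Set.contains
              ((d.insert a (PySem.Set.add (d.getD a PySem.Set.empty) b)).getD b PySem.Set.empty) a
            then PySem.Set.add (PySem.Set.add s a) b else s).Nodup := by
      split
      · exact PySem.Set.nodup_add _ _ (PySem.Set.nodup_add _ _ hnd)
      · exact hnd
    have hmain := ih (p ++ [(a, b)])
      (d.insert a (PySem.Set.add (d.getD a PySem.Set.empty) b))
      (if PySem.Set.contains
              ((d.insert a (PySem.Set.add (d.getD a PySem.Set.empty) b)).getD b PySem.Set.empty) a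
            then PySem.Set.add (PySem.Set.add s a) b else s)
      hfoll hsNew hndNew
    simp only [List.foldl_cons]
    have step : solveStepA (d, s) (a, b) =
        (d.insert a (PySem.Set.add (d.getD a PySem.Set.empty) b),
          if PySem.Set.contains
              ((d.insert a (PySem.Set.add (d.getD a PySem.Set.empty) b)).getD b PySem.Set.empty) a
          then PySem.Set.add (PySem.Set.add s a) b else s) := rfl
    rw [step]
    simpa using hmain

-- keyOf hits (u, v) (u ≤ v) exactly on the two directed edges of the pair
lemma keyOf_eq_iff (a b u v : Int) :
    keyOf (a, b) = (u, v) ↔ ((a, b) = (u, v) ∨ (a, b) = (v, u)) ∧ u ≤ v := by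
  simp only [keyOf, Prod.mk.injEq]
  omega

-- a two-valued countP over a Nodup list counts memberships
lemma countP_pair {α : Type} [DecidableEq α] (l : List α) (hl : l.Nodup) (x y : α)
    (hxy : x ≠ y) (p : α → Bool) (hp : ∀ e, p e = true ↔ (e = x ∨ e = y)) :
    l.countP p = (if x ∈ l then 1 else 0) + (if y ∈ l then 1 else 0) := by
  induction l with
  | nil => simp
  | cons e t ih =>
    rw [List.nodup_cons] at hl
    rw [List.countP_cons, ih hl.2]
    by_cases hex : e = x
    · subst hex
      simp only [List.mem_cons, true_or, if_pos, hp]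
      by_cases hy : y ∈ t <;> simp [hy, hl.1, hxy.symm]
    · by_cases hey : e = y
      · subst hey
        by_cases hx : x ∈ t <;> simp [hx, hl.1, hp, Ne.symm hex]
      · have : p e = false := by
          rw [Bool.eq_false_iff]; intro h; rcases (hp e).mp h with h | h <;> contradiction
        simp [this, List.mem_cons, Ne.symm hex, Ne.symm hey]

-- membership in B's output-building loop over the counter's items
lemma solveB_loop_mem (l : List ((Int × Int) × Int)) (s : PySem.Set Int) (x : Int) :
    x ∈ l.foldl solveStepB s ↔
      x ∈ s ∨ ∃ kv ∈ l, (kv.2 = 2 ∨ kv.1.1 = kv.1.2) ∧ (x = kv.1.1 ∨ x = kv.1.2) := by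
  induction l generalizing s with
  | nil => simp
  | cons kv t ih =>
    simp only [List.foldl_cons, ih, solveStepB, beq_iff_eq, Bool.or_eq_true]
    split <;> rename_i hc <;> simp only [PySem.Set.mem_add, List.mem_cons]
    · constructor
      · rintro (((h | h) | h) | ⟨q, hq, hcq, hx⟩)
        · exact Or.inl h
        · exact Or.inr ⟨kv, Or.inl rfl, hc, Or.inl h⟩
        · exact Or.inr ⟨kv, Or.inl rfl, hc, Or.inr h⟩
        · exact Or.inr ⟨q, Or.inr hq, hcq, hx⟩
      · rintro (h | ⟨q, hq | hq, hcq, hx⟩)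
        · exact Or.inl (Or.inl (Or.inl h))
        · subst hq
          rcases hx with hx | hx
          · exact Or.inl (Or.inl (Or.inr hx))
          · exact Or.inl (Or.inr hx)
        · exact Or.inr ⟨q, hq, hcq, hx⟩
    · constructor
      · rintro (h | ⟨q, hq, hcq, hx⟩)
        · exact Or.inl h
        · exact Or.inr ⟨q, Or.inr hq, hcq, hx⟩
      · rintro (h | ⟨q, hq | hq, hcq, hx⟩)
        · exact Or.inl h
        · subst hq; exact absurd hcq hc
        · exact Or.inr ⟨q, hq, hcq, hx⟩

lemma solveB_loop_nodup (l : List ((Int × Int) × Int)) (s : PySem.Set Int)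
    (hnd : s.Nodup) : (l.foldl solveStepB s).Nodup := by
  induction l generalizing s with
  | nil => exact hnd
  | cons kv t ih =>
    simp only [List.foldl_cons, solveStepB]
    split
    · exact ih _ (PySem.Set.nodup_add _ _ (PySem.Set.nodup_add _ _ hnd))
    · exact ih _ hnd

-- B's output set holds exactly the mutual users
lemma solveB_mem_iff_mut (relations : List (Int × Int)) (x : Int) :
    x ∈ ((PySem.Dict.counter ((PySem.Set.ofList relations).map keyOf)).items.foldl
          solveStepB PySem.Set.empty) ↔ Mut relations x := by
  set distinct := PySem.Set.ofList relations with hdist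
  have hdnd : distinct.Nodup := PySem.Set.nodup_ofList relations
  have hdmem : ∀ e : Int × Int, e ∈ distinct ↔ e ∈ relations := fun e => by
    rw [hdist]; exact PySem.Set.mem_ofList ..
  have hcount : ∀ u v : Int, u < v →
      (((distinct.map keyOf).count (u, v) = 2) ↔ ((u, v) ∈ distinct ∧ (v, u) ∈ distinct)) := by
    intro u v huv
    have hpair := countP_pair distinct hdnd ((u, v) : Int × Int) ((v, u) : Int × Int)
      (by simp [Prod.ext_iff]; omega) (fun e => keyOf e == (u, v))
      (by
        intro e
        obtain ⟨a, b⟩ := e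
        rw [beq_iff_eq, keyOf_eq_iff]
        constructor
        · rintro ⟨h, _⟩; exact h
        · intro h; exact ⟨h, by omega⟩)
    rw [List.count_eq_countP, List.countP_map]
    have hc2 : List.countP ((fun x => x == ((u, v) : Int × Int)) ∘ keyOf) distinct
        = List.countP (fun e => keyOf e == (u, v)) distinct := by
      apply List.countP_congr; intro e _; simp [Function.comp]
    rw [hc2, hpair]
    split_ifs <;> simp_all
  constructor
  · rw [solveB_loop_mem]
    rintro (h | ⟨kv, hkv, hcond, hx⟩)
    · simp [PySem.Set.empty] at h
    · rw [PySem.Dict.items_counter] at hkv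
      obtain ⟨k, hkmem, hkeq⟩ := List.mem_map.mp hkv
      obtain ⟨e, hedist, hekey⟩ := List.mem_map.mp ((PySem.Set.mem_ofList ..).mp hkmem)
      obtain ⟨a, b⟩ := e
      obtain ⟨u, v⟩ := k
      have huv : u ≤ v := ((keyOf_eq_iff a b u v).mp hekey).2
      subst hkeq
      simp only at hcond hx
      rcases hcond with hcnt | heq
      · rcases lt_or_eq_of_le huv with hlt | hveq
        · have : ((PySem.Set.ofList relations).map keyOf).count (u, v) = 2 := by
            exact_mod_cast hcnt
          have hboth := (hcount u v hlt).mp this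
          refine ⟨u, v, (hdmem _).mp hboth.1, ?_, hx⟩
          have := (hdmem _).mp hboth.2
          exact this
        · subst hveq
          have he : (a, b) = (u, u) := by
            rcases ((keyOf_eq_iff a b u u).mp hekey).1 with h | h <;> exact h
          rw [he] at hedist
          exact ⟨u, u, (hdmem _).mp hedist, (hdmem _).mp hedist, hx⟩
      · subst heq
        have he : (a, b) = (u, u) := by
          rcases ((keyOf_eq_iff a b u u).mp hekey).1 with h | h <;> exact h
        rw [he] at hedist
        exact ⟨u, u, (hdmem _).mp hedist, (hdmem _).mp hedist, hx⟩
  · rintro ⟨a, b, hab, hba, hx⟩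
    rw [solveB_loop_mem]
    refine Or.inr ⟨((min a b, max a b), (((distinct.map keyOf).count (min a b, max a b) : Int))),
      ?_, ?_, ?_⟩
    · rw [PySem.Dict.items_counter]
      apply List.mem_map.mpr
      refine ⟨(min a b, max a b), ?_, rfl⟩
      apply (PySem.Set.mem_ofList ..).mpr
      exact List.mem_map.mpr ⟨(a, b), (hdmem _).mpr hab, rfl⟩
    · by_cases hab' : a = b
      · right; simp [hab']
      · left
        have hlt : min a b < max a b := by omega
        have h1 : ((a, b) : Int × Int) ∈ distinct := (hdmem _).mpr hab
        have h2 : ((b, a) : Int × Int) ∈ distinct := (hdmem _).mpr hba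
        have hmm : ((min a b, max a b) : Int × Int) ∈ distinct ∧
            ((max a b, min a b) : Int × Int) ∈ distinct := by
          rcases le_total a b with h | h
          · constructor
            · simpa [min_eq_left h, max_eq_right h] using h1
            · simpa [min_eq_left h, max_eq_right h] using h2
          · constructor
            · simpa [min_eq_right h, max_eq_left h] using h2
            · simpa [min_eq_right h, max_eq_left h] using h1
        have := (hcount _ _ hlt).mpr hmm
        simp only
        exact_mod_cast congrArg (fun n : Nat => (n : Int)) this
    · simp only
      omega

-- ===== VERDICT (by name: the statement is the Claim_ definition above) =====
theorem solve_spec : Claim_equal_solve := by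
  intro relations _
  unfold Spec_solve solve solve_alt
  have hA := solveA_inv relations [] PySem.Dict.empty PySem.Set.empty
    (by intro k x; simp [PySem.Dict.getD_empty, PySem.Set.empty])
    (by intro x; simp [PySem.Set.empty, Mut]) (by simp [PySem.Set.empty])
  have hBmem := solveB_mem_iff_mut relations
  have hBnd := solveB_loop_nodup
    (PySem.Dict.counter ((PySem.Set.ofList relations).map keyOf)).items
    PySem.Set.empty (by simp [PySem.Set.empty])
  apply PySem.List.sorted_eq_sorted_of_perm _ _ _ (fun x y h => h)
  rw [List.perm_ext_iff_of_nodup hA.2 hBnd]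
  intro x
  rw [hA.1, hBmem]
  simp [Mut]
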